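-- pv_equiv track=rewrite | github.com/SarthakMishra/codestruct | src/codestruct/lsp/features/document_symbols.py | _find_entity_line
-- ===== SOURCE A (Python) =====
-- def _find_entity_line(entity_name: str, entity_type: str, document_lines: list[str]) -> int:
-- 	"""Find the line number where an entity is defined."""
-- 	# Look for pattern: "entity_type: entity_name"
-- 	pattern = f"{entity_type}: {entity_name}"
--
-- 	for i, line in enumerate(document_lines):
-- 		if pattern in line:
-- 			return i
--
-- 	# Fallback: look for just the name
-- 	for i, line in enumerate(document_lines):
-- 		if entity_name in line:
-- 			return i
--
-- 	return 0
-- ===== SOURCE B (Python) =====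
-- def _find_entity_line(entity_name: str, entity_type: str, document_lines: list[str]) -> int:
-- 	"""Find the line number where an entity is defined (single pass)."""
-- 	pattern = f"{entity_type}: {entity_name}"
-- 	fallback = None
-- 	for i, line in enumerate(document_lines):
-- 		if pattern in line:
-- 			return i
-- 		if fallback is None and entity_name in line:
-- 			fallback = i
-- 	return fallback if fallback is not None else 0
-- ===== Notes on version B (the rewrite author's own statement) =====
-- stated objective: simpler
-- what changed: Replaces A's two sequential full scans (pattern scan, then name scan) by a single pass that returns immediately on a pattern hit and remembers the first name-only line as a fallback; correctness needs no substring assumption: the name scan only ever runs when the pattern occurs nowhere.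
import Mathlib
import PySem

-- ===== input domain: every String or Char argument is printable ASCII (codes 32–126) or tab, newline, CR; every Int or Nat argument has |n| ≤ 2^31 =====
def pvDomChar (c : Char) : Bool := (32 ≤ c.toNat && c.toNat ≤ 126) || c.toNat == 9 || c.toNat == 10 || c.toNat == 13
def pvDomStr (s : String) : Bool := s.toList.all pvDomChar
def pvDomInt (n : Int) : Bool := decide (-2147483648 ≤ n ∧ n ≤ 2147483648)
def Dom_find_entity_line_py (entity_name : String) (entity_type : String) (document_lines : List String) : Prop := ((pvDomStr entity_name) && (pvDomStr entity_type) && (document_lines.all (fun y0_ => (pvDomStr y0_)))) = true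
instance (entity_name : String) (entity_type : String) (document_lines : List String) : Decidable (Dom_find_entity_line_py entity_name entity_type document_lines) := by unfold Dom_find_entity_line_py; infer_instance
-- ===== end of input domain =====

-- B replaces A's two sequential scans by one pass with a remembered fallback index (objective: simpler).

-- ===== PORT A =====
-- first loop: first line containing the pattern
def pvFindLine (needle : String) : List String → Int → Option Int
  | [], _ => none
  | l :: rest, i => if PySem.Str.isIn needle l then some i else pvFindLine needle rest (i + 1)

def find_entity_line_py (entity_name : String) (entity_type : String) (document_lines : List String) : Int :=
  let pattern := entity_type ++ ": " ++ entity_name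
  match pvFindLine pattern document_lines 0 with
  | some i => i
  | none =>
    match pvFindLine entity_name document_lines 0 with
    | some i => i
    | none => 0

-- ===== PORT B =====
-- single pass: return on pattern hit, remember first name-only hit as fallback
def pvOnePass (pattern entity_name : String) : List String → Int → Option Int → Int
  | [], _, fb => fb.getD 0
  | l :: rest, i, fb =>
    if PySem.Str.isIn pattern l then i
    else pvOnePass pattern entity_name rest (i + 1)
      (if fb.isNone && PySem.Str.isIn entity_name l then some i else fb)

def find_entity_line_py_alt (entity_name : String) (entity_type : String) (document_lines : List String) : Int :=
  let pattern := entity_type ++ ": " ++ entity_name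
  pvOnePass pattern entity_name document_lines 0 none

-- ===== PRECONDITION & SPEC =====
def Spec_find_entity_line_py (entity_name : String) (entity_type : String) (document_lines : List String) (out : Int) : Prop := out = find_entity_line_py_alt entity_name entity_type document_lines
instance (entity_name : String) (entity_type : String) (document_lines : List String) (out : Int) : Decidable (Spec_find_entity_line_py entity_name entity_type document_lines out) := by unfold Spec_find_entity_line_py; infer_instance

-- ===== CLAIM (what is proved, stated in full; the proofs are below) =====
def Claim_equal_find_entity_line_py : Prop := ∀ (entity_name : String) (entity_type : String) (document_lines : List String), Dom_find_entity_line_py entity_name entity_type document_lines → Spec_find_entity_line_py entity_name entity_type document_lines (find_entity_line_py entity_name entity_type document_lines)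

-- ===== LEMMAS AND PROOFS =====

-- loop invariant: the one-pass fold equals A's two-scan result, with fb the fallback found so far
theorem pvOnePass_eq (pattern entity_name : String) :
    ∀ (lines : List String) (i : Int) (fb : Option Int),
      pvOnePass pattern entity_name lines i fb =
        match pvFindLine pattern lines i with
        | some j => j
        | none =>
          match fb with
          | some f => f
          | none => (pvFindLine entity_name lines i).getD 0 := by
  intro lines
  induction lines with
  | nil => intro i fb; cases fb <;> simp [pvOnePass, pvFindLine]
  | cons l rest ih =>
    intro i fb
    rw [pvOnePass, pvFindLine]
    simp only [PySem.Str.isIn]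
    by_cases hp : PySem.Chars.isIn pattern.toList l.toList = true
    · simp [hp]
    · rw [if_neg hp, if_neg hp, ih]
      cases fb with
      | some f => simp
      | none =>
        rw [pvFindLine]
        simp only [PySem.Str.isIn]
        cases hq : pvFindLine pattern rest (i + 1) with
        | some j => simp
        | none =>
          by_cases hn : PySem.Chars.isIn entity_name.toList l.toList = true
          · simp [hn]
          · simp [hn]

-- ===== VERDICT (by name: the statement is the Claim_ definition above) =====
theorem find_entity_line_py_spec : Claim_equal_find_entity_line_py := by
  intro entity_name entity_type document_lines _
  unfold Spec_find_entity_line_py find_entity_line_py find_entity_line_py_alt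
  rw [pvOnePass_eq]
  cases h : pvFindLine (entity_type ++ ": " ++ entity_name) document_lines 0 with
  | some j => simp [h]
  | none =>
    cases h2 : pvFindLine entity_name document_lines 0 <;> simp [h]
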